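-- pv_equiv track=rewrite | github.com/ShuangyiTong/Phasic-and-tonic-pain-serve-distinct-functions-during-adaptive-behaviour | core/individual_subject.py | segment_timestamps
-- ===== SOURCE A (Python) =====
-- from typing import List, Tuple, Callable, Union, Any
--
-- def segment_timestamps(data: List, to_be_segmented_ts: List[int], segment_ts: List[int], segment_length: int = 60000):
--     ret = []
--
--     # previous single loop is not correct, affecting some data results (although not significantly)
--     for seg_ts in segment_ts:
--         current_seg = []
--         for d, ts in zip(data, to_be_segmented_ts):
--             if ts < seg_ts:
--                 continue
--             elif ts > seg_ts and ts < seg_ts + segment_length: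
--                 current_seg.append(d)
--             else:
--                 break
--         ret.append(current_seg)
--
--     return ret
-- ===== SOURCE B (Python) =====
-- def segment_timestamps(data, to_be_segmented_ts, segment_ts, segment_length=60000):
--     # Single pass over the data stream: each segment keeps an (alive, bucket) state;
--     # a segment stops collecting forever once its break condition fires.
--     buckets = [[] for _ in segment_ts]
--     alive = [True] * len(segment_ts)
--     for d, ts in zip(data, to_be_segmented_ts):
--         for j, s in enumerate(segment_ts):
--             if not alive[j] or ts < s:
--                 continue
--             if s < ts < s + segment_length:
--                 buckets[j].append(d)
--             else:
--                 alive[j] = False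
--     return buckets
-- ===== Notes on version B (the rewrite author's own statement) =====
-- stated objective: alternative
-- what changed: Inverts the loop nesting: instead of re-scanning the whole data stream once per segment start with continue/break, B makes one pass over the zipped data maintaining a per-segment (alive, bucket) state and permanently deactivates a segment when its break condition fires.
import Mathlib
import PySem

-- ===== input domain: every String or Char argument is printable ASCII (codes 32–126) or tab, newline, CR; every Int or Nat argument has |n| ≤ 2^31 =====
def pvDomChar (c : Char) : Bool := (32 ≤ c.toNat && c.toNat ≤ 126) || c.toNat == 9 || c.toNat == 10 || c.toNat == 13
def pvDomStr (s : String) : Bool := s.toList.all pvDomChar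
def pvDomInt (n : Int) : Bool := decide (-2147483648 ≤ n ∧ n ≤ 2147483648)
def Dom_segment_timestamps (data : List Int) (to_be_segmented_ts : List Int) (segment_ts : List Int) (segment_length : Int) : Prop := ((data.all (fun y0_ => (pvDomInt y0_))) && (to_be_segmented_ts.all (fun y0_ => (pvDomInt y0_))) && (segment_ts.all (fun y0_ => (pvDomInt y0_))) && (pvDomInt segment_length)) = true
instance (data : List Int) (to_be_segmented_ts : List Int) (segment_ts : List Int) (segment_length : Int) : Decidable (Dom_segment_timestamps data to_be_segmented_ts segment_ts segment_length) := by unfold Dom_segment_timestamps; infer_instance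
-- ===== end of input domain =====

-- B inverts the loop nesting: one pass over the zipped data maintaining a per-segment
-- (alive, bucket) state, instead of A's per-segment rescans of the data (alternative; same cost).
-- ===== PORT A =====
-- inner loop of A: scan zip(data, to_be_segmented_ts); continue while ts < s,
-- append while s < ts < s + L, break otherwise
def segA_inner (pairs : List (Int × Int)) (s L : Int) : List Int :=
  match pairs with
  | [] => []
  | (d, ts) :: rest =>
    if ts < s then segA_inner rest s L
    else if ts > s ∧ ts < s + L then d :: segA_inner rest s L
    else []

def segment_timestamps (data : List Int) (to_be_segmented_ts : List Int) (segment_ts : List Int) (segment_length : Int) : List (List Int) :=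
  segment_ts.map (fun s => segA_inner (data.zip to_be_segmented_ts) s segment_length)

-- ===== PORT B =====
-- one step of B's inner loop: update segment s's (alive, bucket) state with pair (d, ts)
def segB_step (L : Int) (p : Int × Int) (st : Int × Bool × List Int) : Int × Bool × List Int :=
  let (d, ts) := p
  let (s, alive, acc) := st
  if alive = false ∨ ts < s then (s, alive, acc)
  else if s < ts ∧ ts < s + L then (s, alive, acc ++ [d])
  else (s, false, acc)

def segment_timestamps_alt (data : List Int) (to_be_segmented_ts : List Int) (segment_ts : List Int) (segment_length : Int) : List (List Int) :=
  let init := segment_ts.map (fun s => (s, true, ([] : List Int)))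
  let final := (data.zip to_be_segmented_ts).foldl
    (fun st p => st.map (segB_step segment_length p)) init
  final.map (fun x => x.2.2)

-- ===== PRECONDITION & SPEC =====
def Spec_segment_timestamps (data : List Int) (to_be_segmented_ts : List Int) (segment_ts : List Int) (segment_length : Int) (out : List (List Int)) : Prop := out = segment_timestamps_alt data to_be_segmented_ts segment_ts segment_length
instance (data : List Int) (to_be_segmented_ts : List Int) (segment_ts : List Int) (segment_length : Int) (out : List (List Int)) : Decidable (Spec_segment_timestamps data to_be_segmented_ts segment_ts segment_length out) := by unfold Spec_segment_timestamps; infer_instance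

-- ===== CLAIM =====
def Claim_equal_segment_timestamps : Prop := ∀ (data : List Int) (to_be_segmented_ts : List Int) (segment_ts : List Int) (segment_length : Int), Dom_segment_timestamps data to_be_segmented_ts segment_ts segment_length → Spec_segment_timestamps data to_be_segmented_ts segment_ts segment_length (segment_timestamps data to_be_segmented_ts segment_ts segment_length)

-- ===== LEMMAS AND PROOFS =====
-- folding a pointwise map over the state list acts independently on each element
theorem foldl_map_comm {α β : Type} (g : β → α → α) (ps : List β) (st : List α) :
    ps.foldl (fun st p => st.map (g p)) st = st.map (fun x => ps.foldl (fun x p => g p x) x) := by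
  induction ps generalizing st with
  | nil => simp
  | cons p rest ih =>
    simp only [List.foldl_cons, ih, List.map_map]
    rfl

theorem segB_dead (L : Int) (ps : List (Int × Int)) (s : Int) (acc : List Int) :
    ps.foldl (fun x p => segB_step L p x) (s, false, acc) = (s, false, acc) := by
  induction ps with
  | nil => rfl
  | cons p rest ih =>
    obtain ⟨d, ts⟩ := p
    simpa [segB_step] using ih

theorem segB_alive (L : Int) (ps : List (Int × Int)) (s : Int) (acc : List Int) :
    (ps.foldl (fun x p => segB_step L p x) (s, true, acc)).2.2 = acc ++ segA_inner ps s L := by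
  induction ps generalizing acc with
  | nil => simp [segA_inner]
  | cons p rest ih =>
    obtain ⟨d, ts⟩ := p
    rw [List.foldl_cons]
    by_cases h1 : ts < s
    · have hstep : segB_step L (d, ts) (s, true, acc) = (s, true, acc) := by
        simp [segB_step, h1]
      rw [hstep, ih]
      simp [segA_inner, h1]
    · by_cases h2 : s < ts ∧ ts < s + L
      · have hstep : segB_step L (d, ts) (s, true, acc) = (s, true, acc ++ [d]) := by
          simp [segB_step, h1, h2]
        have h2' : ts > s ∧ ts < s + L := ⟨h2.1, h2.2⟩
        rw [hstep, ih]
        simp [segA_inner, h1, h2']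
      · have hstep : segB_step L (d, ts) (s, true, acc) = (s, false, acc) := by
          simp [segB_step, h1, h2]
        have h2' : ¬ (ts > s ∧ ts < s + L) := fun h => h2 ⟨h.1, h.2⟩
        rw [hstep, segB_dead]
        simp [segA_inner, h1, h2']

-- ===== VERDICT =====
theorem segment_timestamps_spec : Claim_equal_segment_timestamps := by
  intro data tbs seg L _
  unfold Spec_segment_timestamps segment_timestamps segment_timestamps_alt
  simp only [foldl_map_comm, List.map_map]
  refine List.map_congr_left (fun s _ => ?_)
  simpa using (segB_alive L (data.zip tbs) s []).symm
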